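-- pv_equiv track=rewrite | github.com/spetey/toy-agent | programs/hamming.py | fb2d_syndrome_simulation
-- ===== SOURCE A (Python) =====
-- def fb2d_syndrome_simulation(codeword):
--     """Simulate the fb2d opcode sequence for syndrome computation.
--
--     This models what the actual fb2d gadget does using only:
--     - r (rotate right 1 bit)
--     - l (rotate left 1 bit)
--     - x ([H0] ^= [H1])
--     - Operations on individual cells
--
--     The approach: for each syndrome bit, XOR the codeword into a scratch
--     cell after rotating to align each target bit with bit 0. We only care
--     about bit 0 of the scratch cell at the end.
--
--     Returns (syndrome, p_all_err) where syndrome is the 3-bit value.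
--     """
--     # We work with these "cells" (simulating fb2d grid cells):
--     cw = codeword           # the codeword cell (preserved via rotate-XOR-unrotate)
--     scratch = 0             # scratch cell for accumulating syndrome bits
--     syndrome = 0            # will hold 3-bit syndrome
--
--     # --- Compute s0: XOR of bits {1, 3, 5, 7} ---
--     scratch = 0
--     for target_bit in [1, 3, 5, 7]:
--         # Rotate codeword right by target_bit positions
--         temp = cw
--         for _ in range(target_bit):
--             temp = ((temp >> 1) | ((temp & 1) << 7)) & 0xFF
--         # XOR into scratch
--         scratch ^= temp
--         # (In fb2d: we'd rotate cw in-place, XOR, then rotate back.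
--         #  But since we're simulating, we use temp.)
--     s0 = scratch & 1  # only bit 0 matters
--
--     # --- Compute s1: XOR of bits {2, 3, 6, 7} ---
--     scratch = 0
--     for target_bit in [2, 3, 6, 7]:
--         temp = cw
--         for _ in range(target_bit):
--             temp = ((temp >> 1) | ((temp & 1) << 7)) & 0xFF
--         scratch ^= temp
--     s1 = scratch & 1
--
--     # --- Compute s2: XOR of bits {4, 5, 6, 7} ---
--     scratch = 0
--     for target_bit in [4, 5, 6, 7]:
--         temp = cw
--         for _ in range(target_bit):
--             temp = ((temp >> 1) | ((temp & 1) << 7)) & 0xFF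
--         scratch ^= temp
--     s2 = scratch & 1
--
--     syndrome = (s2 << 2) | (s1 << 1) | s0
--
--     # --- Overall parity: XOR all 8 bits ---
--     # XOR the codeword with itself rotated by 4, then the result with
--     # itself rotated by 2, then the result with itself rotated by 1.
--     # This folds all 8 bits into bit 0 via a reduction tree.
--     p = cw
--     p ^= ((p >> 4) | ((p & 0xF) << 4)) & 0xFF  # fold: bit i ^= bit (i+4)
--     p ^= ((p >> 2) | ((p & 0x3) << 6)) & 0xFF  # fold: bit i ^= bit (i+2)
--     p ^= ((p >> 1) | ((p & 0x1) << 7)) & 0xFF  # fold: bit i ^= bit (i+1)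
--     p_all_err = p & 1
--
--     return syndrome, p_all_err
-- ===== SOURCE B (Python) =====
-- def _parity(x):
--     return x.bit_count() & 1
--
--
-- def fb2d_syndrome_simulation(codeword):
--     byte = codeword & 0xFF
--     s0 = _parity(byte & 0xAA)
--     s1 = _parity(byte & 0xCC)
--     s2 = _parity(byte & 0xF0)
--     syndrome = (s2 << 2) | (s1 << 1) | s0
--     return syndrome, _parity(byte)
-- ===== Notes on version B (the rewrite author's own statement) =====
-- stated objective: simpler
-- what changed: Replaces A's rotate-right-by-one loops and its three-step rotate-XOR parity reduction tree with a single low-byte mask and four direct mask-and-popcount parity computations (no loops at all).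
import Mathlib
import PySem

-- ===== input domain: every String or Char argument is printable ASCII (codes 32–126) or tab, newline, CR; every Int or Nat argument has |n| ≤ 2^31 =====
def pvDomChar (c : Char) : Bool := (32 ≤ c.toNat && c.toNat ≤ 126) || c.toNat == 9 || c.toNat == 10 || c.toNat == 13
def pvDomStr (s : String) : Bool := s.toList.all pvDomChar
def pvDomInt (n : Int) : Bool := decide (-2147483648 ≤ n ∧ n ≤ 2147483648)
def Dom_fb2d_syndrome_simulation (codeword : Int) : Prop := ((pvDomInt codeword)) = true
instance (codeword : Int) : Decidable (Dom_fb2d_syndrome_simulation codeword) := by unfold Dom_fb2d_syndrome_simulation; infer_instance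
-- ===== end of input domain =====

-- B replaces A's rotate-and-accumulate loops by direct mask-and-popcount parity computations (objective: simpler); the ports below are proved to agree on every Int.

-- ===== PORT A =====
-- one rotate-right-by-1 step of the 8-bit cell: ((temp >> 1) | ((temp & 1) << 7)) & 0xFF
def pvRot1 (t : Int) : Int :=
  PySem.Int.band (PySem.Int.bor (t >>> (1 : Nat)) ((PySem.Int.band t 1) <<< (7 : Nat))) 255

-- one syndrome-bit loop of A: XOR into scratch the codeword rotated right target_bit times, keep bit 0
def pvSBit (cw : Int) (bits : List Int) : Int :=
  PySem.Int.band
    (bits.foldl (fun scratch tb =>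
      PySem.Int.bxor scratch
        ((PySem.List.pyRange 0 tb 1).foldl (fun temp _ => pvRot1 temp) cw)) 0) 1

-- one parity fold step of A: p ^= ((p >> s) | ((p & mask) << ls)) & 0xFF
def pvFoldStep (s ls : Nat) (mask : Int) (p : Int) : Int :=
  PySem.Int.bxor p
    (PySem.Int.band (PySem.Int.bor (p >>> s) ((PySem.Int.band p mask) <<< ls)) 255)

def fb2d_syndrome_simulation (codeword : Int) : Int × Int :=
  let cw := codeword
  let s0 := pvSBit cw [1, 3, 5, 7]
  let s1 := pvSBit cw [2, 3, 6, 7]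
  let s2 := pvSBit cw [4, 5, 6, 7]
  let syndrome := PySem.Int.bor (PySem.Int.bor (s2 <<< (2 : Nat)) (s1 <<< (1 : Nat))) s0
  let p3 := pvFoldStep 1 7 1 (pvFoldStep 2 6 3 (pvFoldStep 4 4 15 cw))
  (syndrome, PySem.Int.band p3 1)

-- ===== PORT B =====
-- _parity(x) = x.bit_count() & 1
def pvParity (x : Int) : Int := PySem.Int.band ((PySem.Int.bitCount x : Nat) : Int) 1

def fb2d_syndrome_simulation_alt (codeword : Int) : Int × Int :=
  let byte := PySem.Int.band codeword 255
  let s0 := pvParity (PySem.Int.band byte 170)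
  let s1 := pvParity (PySem.Int.band byte 204)
  let s2 := pvParity (PySem.Int.band byte 240)
  let syndrome := PySem.Int.bor (PySem.Int.bor (s2 <<< (2 : Nat)) (s1 <<< (1 : Nat))) s0
  (syndrome, pvParity byte)

-- ===== PRECONDITION & SPEC =====
def Spec_fb2d_syndrome_simulation (codeword : Int) (out : Int × Int) : Prop := out = fb2d_syndrome_simulation_alt codeword
instance (codeword : Int) (out : Int × Int) : Decidable (Spec_fb2d_syndrome_simulation codeword out) := by unfold Spec_fb2d_syndrome_simulation; infer_instance

-- ===== CLAIM (what is proved, stated in full; the proofs are below) =====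
def Claim_equal_fb2d_syndrome_simulation : Prop := ∀ (codeword : Int), Dom_fb2d_syndrome_simulation codeword → Spec_fb2d_syndrome_simulation codeword (fb2d_syndrome_simulation codeword)

-- ===== LEMMAS AND PROOFS =====

theorem pv_tb_hi {x k i : Nat} (h : x < 2^k) (h2 : k ≤ i) : x.testBit i = false :=
  Nat.testBit_eq_false_of_lt (lt_of_lt_of_le h (Nat.pow_le_pow_right (by norm_num) h2))

-- mask
theorem pv_and_mask (a k : Nat) : a &&& (2^k - 1) = a % 2^k := by
  apply Nat.eq_of_testBit_eq; intro i
  simp [Nat.testBit_mod_two_pow, Bool.and_comm]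

-- parity decomposition of xor and and
theorem pv_xor_decomp (a b ar br : Nat) (ha : ar < 2) (hb : br < 2) :
    (2*a+ar) ^^^ (2*b+br) = 2*(a^^^b) + (ar^^^br) := by
  apply Nat.eq_of_testBit_eq; intro i
  cases i with
  | zero =>
    simp only [Nat.testBit_zero, Nat.testBit_xor]
    interval_cases ar <;> interval_cases br <;> simp [Nat.add_mul_mod_self_left] <;> omega
  | succ j =>
    have h1 : (2*a+ar)/2 = a := by omega
    have h2 : (2*b+br)/2 = b := by omega
    have h3 : (2*(a^^^b) + (ar^^^br))/2 = a^^^b := by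
      have : ar^^^br < 2 := by interval_cases ar <;> interval_cases br <;> decide
      omega
    rw [Nat.testBit_xor, Nat.testBit_succ, Nat.testBit_succ, Nat.testBit_succ, h1, h2, h3, Nat.testBit_xor]

theorem pv_and_decomp (a b ar br : Nat) (ha : ar < 2) (hb : br < 2) :
    (2*a+ar) &&& (2*b+br) = 2*(a&&&b) + (ar&&&br) := by
  apply Nat.eq_of_testBit_eq; intro i
  cases i with
  | zero =>
    simp only [Nat.testBit_zero, Nat.testBit_and]
    interval_cases ar <;> interval_cases br <;> simp [Nat.add_mul_mod_self_left] <;> omega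
  | succ j =>
    have h1 : (2*a+ar)/2 = a := by omega
    have h2 : (2*b+br)/2 = b := by omega
    have h3 : (2*(a&&&b) + (ar&&&br))/2 = a&&&b := by
      have : ar&&&br < 2 := by interval_cases ar <;> interval_cases br <;> decide
      omega
    rw [Nat.testBit_and, Nat.testBit_succ, Nat.testBit_succ, Nat.testBit_succ, h1, h2, h3, Nat.testBit_and]

-- complement: (2^k-1) ^^^ x = 2^k-1-x for x < 2^k
theorem pv_compl (k x : Nat) (h : x < 2^k) : (2^k-1) ^^^ x = 2^k - 1 - x := by
  induction k generalizing x with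
  | zero => interval_cases x; decide
  | succ k ih =>
    have hx2 : x / 2 < 2^k := by omega
    have hM : 2^(k+1) - 1 = 2*(2^k - 1) + 1 := by have := Nat.one_le_two_pow (n := k); omega
    have hx : x = 2*(x/2) + x % 2 := by omega
    rw [hM]
    calc (2*(2^k-1)+1) ^^^ x = (2*(2^k-1)+1) ^^^ (2*(x/2) + x%2) := by rw [← hx]
      _ = 2*((2^k-1) ^^^ (x/2)) + (1 ^^^ x%2) := pv_xor_decomp _ _ _ _ (by omega) (by omega)
      _ = 2*(2^k - 1 - x/2) + (1 ^^^ x%2) := by rw [ih _ hx2]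
      _ = 2*(2^k+1-1) - 1 - x := by
          have h2 : 1 ^^^ x%2 = 1 - x%2 := by
            have : x % 2 < 2 := by omega
            interval_cases h : x % 2 <;> decide
          omega
    omega

-- subset subtraction: (m&&&c) + (m ^^^ (m&&&c)) = m
theorem pv_and_add_xor (m c : Nat) : (m &&& c) + (m ^^^ (m &&& c)) = m := by
  induction m using Nat.strong_induction_on generalizing c with
  | _ m ih =>
    match m with
    | 0 => simp
    | Nat.succ n =>
      have hdm : Nat.succ n = 2*(Nat.succ n/2) + Nat.succ n%2 := by omega
      have hdc : c = 2*(c/2) + c%2 := by omega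
      have h1 := pv_and_decomp (Nat.succ n/2) (c/2) (Nat.succ n%2) (c%2) (by omega) (by omega)
      rw [← hdm, ← hdc] at h1
      have hand2 : Nat.succ n%2 &&& c%2 < 2 := by
        have := Nat.and_le_left (n := Nat.succ n%2) (m := c%2); omega
      have h2 := pv_xor_decomp (Nat.succ n/2) (Nat.succ n/2 &&& c/2) (Nat.succ n%2) (Nat.succ n%2 &&& c%2) (by omega) hand2
      rw [← hdm, ← h1] at h2
      have ihh := ih (Nat.succ n/2) (by omega) (c/2)
      have hb : (Nat.succ n%2 &&& c%2) + ((Nat.succ n%2) ^^^ (Nat.succ n%2 &&& c%2)) = Nat.succ n%2 := by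
        rcases Nat.mod_two_eq_zero_or_one (Nat.succ n) with h|h <;>
          rcases Nat.mod_two_eq_zero_or_one c with h2|h2 <;> rw [h, h2] <;> decide
      omega

theorem pv_id_or_mixed (k x y : Nat) (hx : x < 2^k) (hy : y < 2^k) :
    ((2^k-1) ^^^ x) ||| y = (2^k-1) ^^^ (x ^^^ (x &&& y)) := by
  apply Nat.eq_of_testBit_eq; intro i
  by_cases hik : i < k
  · simp only [Nat.testBit_or, Nat.testBit_and, Nat.testBit_xor, Nat.testBit_two_pow_sub_one, hik,
      decide_true, Bool.true_xor]
    generalize x.testBit i = a; generalize y.testBit i = b; cases a <;> cases b <;> rfl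
  · simp only [Nat.testBit_or, Nat.testBit_and, Nat.testBit_xor, Nat.testBit_two_pow_sub_one,
      hik, decide_false, Bool.false_xor, pv_tb_hi (i := i) hx (by omega), pv_tb_hi (i := i) hy (by omega)]
    try rfl

theorem pv_id_or_neg (k x y : Nat) (hx : x < 2^k) (hy : y < 2^k) :
    ((2^k-1) ^^^ x) ||| ((2^k-1) ^^^ y) = (2^k-1) ^^^ (x &&& y) := by
  apply Nat.eq_of_testBit_eq; intro i
  by_cases hik : i < k
  · simp only [Nat.testBit_or, Nat.testBit_and, Nat.testBit_xor, Nat.testBit_two_pow_sub_one, hik,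
      decide_true, Bool.true_xor]
    generalize x.testBit i = a; generalize y.testBit i = b; cases a <;> cases b <;> rfl
  · simp only [Nat.testBit_or, Nat.testBit_and, Nat.testBit_xor, Nat.testBit_two_pow_sub_one,
      hik, decide_false, Bool.false_xor, pv_tb_hi (i := i) hx (by omega), pv_tb_hi (i := i) hy (by omega)]
    try rfl

theorem pv_pow_pos (k : Nat) : (0:Int) < 2^k := by positivity

-- ===== Int low-bits normal form =====
def pvNF (k : Nat) (u : Int) : Nat := (u % (2:Int)^k).toNat

theorem pvNF_lt (k : Nat) (u : Int) : pvNF k u < 2^k := by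
  have h := Int.emod_lt_of_pos u (pv_pow_pos k)
  have h2 := Int.emod_nonneg u (ne_of_gt (pv_pow_pos k))
  unfold pvNF
  have : ((2:Int)^k) = ((2^k : Nat) : Int) := by push_cast; ring
  omega

theorem pvNF_cast (k a : Nat) : pvNF k (a : Int) = a % 2^k := by
  unfold pvNF
  rw [show ((2:Int)^k) = ((2^k : Nat) : Int) by push_cast; ring, ← Int.natCast_emod,
    Int.toNat_natCast]

theorem pvNF_neg (k m : Nat) : pvNF k (-(m : Int) - 1) = 2^k - 1 - m % 2^k := by
  have hp : 0 < 2^k := Nat.two_pow_pos k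
  have hmp := Nat.div_add_mod m (2^k)
  have hlt := Nat.mod_lt m hp
  have h1 : -(m:Int) - 1 = ((2^k - 1 - m % 2^k : Nat) : Int) + ((2:Int)^k) * (-(↑(m / 2^k):Int) - 1) := by
    have hc : ((2^k - 1 - m % 2^k : Nat) : Int) = ((2^k : Nat) : Int) - 1 - ((m % 2^k : Nat) : Int) := by
      have : m % 2^k ≤ 2^k - 1 := by omega
      push_cast [Nat.cast_sub this, Nat.cast_sub (show 1 ≤ 2^k by omega)]
      ring
    have hmpc : ((2^k : Nat) : Int) * ((m / 2^k : Nat) : Int) + ((m % 2^k : Nat) : Int) = (m : Int) := by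
      exact_mod_cast congrArg (Nat.cast : Nat → Int) hmp
    have hpow : ((2^k : Nat) : Int) = (2:Int)^k := by push_cast; ring
    rw [hpow] at hmpc
    rw [hc, hpow]
    linear_combination hmpc
  unfold pvNF
  rw [h1, Int.add_mul_emod_self_left, Int.emod_eq_of_lt (by positivity) (by exact_mod_cast (by omega : 2^k - 1 - m % 2^k < 2^k)), Int.toNat_natCast]

theorem pv_int_cases (u : Int) : (∃ a : Nat, u = ↑a) ∨ (∃ m : Nat, u = -↑m - 1) := by
  rcases u with a | m
  · exact Or.inl ⟨a, rfl⟩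
  · exact Or.inr ⟨m, by rw [Int.negSucc_eq]; ring⟩

theorem pv_nshr (s k a : Nat) : (a >>> s) % 2^k = (a % 2^(k+s)) >>> s := by
  apply Nat.eq_of_testBit_eq; intro i
  rw [Nat.testBit_mod_two_pow, Nat.testBit_shiftRight, Nat.testBit_shiftRight,
    Nat.testBit_mod_two_pow]
  by_cases h : i < k
  · simp [h, show s + i < k + s by omega]
  · simp [h, show ¬(s + i < k + s) by omega]

theorem pv_compl_shr (s k x : Nat) (hx : x < 2^(k+s)) :
    (2^(k+s) - 1 - x) >>> s = 2^k - 1 - (x >>> s) := by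
  have h1 : x >>> s < 2^k := by
    rw [Nat.shiftRight_eq_div_pow]
    have h2 : 2^(k+s) = 2^s * 2^k := by rw [pow_add, mul_comm]
    exact Nat.div_lt_of_lt_mul (by omega)
  rw [← pv_compl (k+s) x hx, ← pv_compl k (x >>> s) h1]
  apply Nat.eq_of_testBit_eq; intro i
  rw [Nat.testBit_shiftRight, Nat.testBit_xor, Nat.testBit_xor, Nat.testBit_two_pow_sub_one,
    Nat.testBit_two_pow_sub_one, Nat.testBit_shiftRight]
  by_cases h : i < k
  · simp [h, show s + i < k + s by omega]
  · simp [h, show ¬(s + i < k + s) by omega]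

theorem pvNF_bxor (k : Nat) (u v : Int) :
    pvNF k (PySem.Int.bxor u v) = pvNF k u ^^^ pvNF k v := by
  have hp : 0 < 2^k := Nat.two_pow_pos k
  rcases pv_int_cases u with ⟨a, rfl⟩ | ⟨m, rfl⟩ <;> rcases pv_int_cases v with ⟨b, rfl⟩ | ⟨n, rfl⟩
  · rw [show PySem.Int.bxor ↑a ↑b = ↑(a ^^^ b) by
      simp [PySem.Int.bxor, Int.toNat_natCast]]
    rw [pvNF_cast, pvNF_cast, pvNF_cast, Nat.xor_mod_two_pow]
  · rw [show PySem.Int.bxor ↑a (-(↑n:Int)-1) = -↑(a ^^^ n) - 1 by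
      unfold PySem.Int.bxor
      rw [if_pos (by positivity), if_neg (by omega), show (-(-(↑n:Int)-1)-1) = ↑n by ring]
      simp [Int.toNat_natCast]]
    rw [pvNF_neg, pvNF_cast, pvNF_neg,
      ← pv_compl k (n % 2^k) (Nat.mod_lt n hp), Nat.xor_mod_two_pow,
      ← pv_compl k (a % 2^k ^^^ n % 2^k) (Nat.xor_lt_two_pow (Nat.mod_lt a hp) (Nat.mod_lt n hp))]
    simp [Nat.xor_assoc, Nat.xor_comm, Nat.xor_left_comm]
  · rw [show PySem.Int.bxor (-(↑m:Int)-1) ↑b = -↑(m ^^^ b) - 1 by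
      unfold PySem.Int.bxor
      rw [if_neg (by omega), if_pos (by positivity), show (-(-(↑m:Int)-1)-1) = ↑m by ring]
      simp [Int.toNat_natCast]]
    rw [pvNF_neg, pvNF_cast, pvNF_neg,
      ← pv_compl k (m % 2^k) (Nat.mod_lt m hp), Nat.xor_mod_two_pow,
      ← pv_compl k (m % 2^k ^^^ b % 2^k) (Nat.xor_lt_two_pow (Nat.mod_lt m hp) (Nat.mod_lt b hp))]
    simp [Nat.xor_assoc, Nat.xor_comm, Nat.xor_left_comm]
  · rw [show PySem.Int.bxor (-(↑m:Int)-1) (-(↑n:Int)-1) = ↑(m ^^^ n) by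
      unfold PySem.Int.bxor
      rw [if_neg (by omega), if_neg (by omega), show (-(-(↑m:Int)-1)-1) = ↑m by ring,
        show (-(-(↑n:Int)-1)-1) = ↑n by ring]
      simp [Int.toNat_natCast]]
    rw [pvNF_cast, pvNF_neg, pvNF_neg, Nat.xor_mod_two_pow,
      ← pv_compl k (m % 2^k) (Nat.mod_lt m hp), ← pv_compl k (n % 2^k) (Nat.mod_lt n hp)]
    simp [Nat.xor_assoc, Nat.xor_comm, Nat.xor_left_comm]

theorem pvNF_bor (k : Nat) (u v : Int) :
    pvNF k (PySem.Int.bor u v) = pvNF k u ||| pvNF k v := by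
  have hp : 0 < 2^k := Nat.two_pow_pos k
  rcases pv_int_cases u with ⟨a, rfl⟩ | ⟨m, rfl⟩ <;> rcases pv_int_cases v with ⟨b, rfl⟩ | ⟨n, rfl⟩
  · rw [show PySem.Int.bor ↑a ↑b = ↑(a ||| b) by
      unfold PySem.Int.bor
      rw [if_pos (by positivity), if_pos (by positivity)]
      simp [Int.toNat_natCast]]
    rw [pvNF_cast, pvNF_cast, pvNF_cast, Nat.or_mod_two_pow]
  · rw [show PySem.Int.bor ↑a (-(↑n:Int)-1) = -↑(n - (n &&& a)) - 1 by
      unfold PySem.Int.bor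
      rw [if_pos (by positivity), if_neg (by omega), show (-(-(↑n:Int)-1)-1) = ↑n by ring]
      simp [Int.toNat_natCast]]
    rw [pvNF_neg, pvNF_cast, pvNF_neg,
      show n - (n &&& a) = n ^^^ (n &&& a) from by have := pv_and_add_xor n a; omega,
      Nat.xor_mod_two_pow, Nat.and_mod_two_pow,
      ← pv_compl k (n % 2^k) (Nat.mod_lt n hp), Nat.or_comm (a % 2^k),
      pv_id_or_mixed k (n % 2^k) (a % 2^k) (Nat.mod_lt n hp) (Nat.mod_lt a hp),
      ← pv_compl k ((n % 2^k) ^^^ (n % 2^k &&& a % 2^k))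
        (Nat.xor_lt_two_pow (Nat.mod_lt n hp)
          (Nat.lt_of_le_of_lt (Nat.and_le_left) (Nat.mod_lt n hp)))]
  · rw [show PySem.Int.bor (-(↑m:Int)-1) ↑b = -↑(m - (m &&& b)) - 1 by
      unfold PySem.Int.bor
      rw [if_neg (by omega), if_pos (by positivity), show (-(-(↑m:Int)-1)-1) = ↑m by ring]
      simp [Int.toNat_natCast]]
    rw [pvNF_neg, pvNF_cast, pvNF_neg,
      show m - (m &&& b) = m ^^^ (m &&& b) from by have := pv_and_add_xor m b; omega,
      Nat.xor_mod_two_pow, Nat.and_mod_two_pow,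
      ← pv_compl k (m % 2^k) (Nat.mod_lt m hp),
      pv_id_or_mixed k (m % 2^k) (b % 2^k) (Nat.mod_lt m hp) (Nat.mod_lt b hp),
      ← pv_compl k ((m % 2^k) ^^^ (m % 2^k &&& b % 2^k))
        (Nat.xor_lt_two_pow (Nat.mod_lt m hp)
          (Nat.lt_of_le_of_lt (Nat.and_le_left) (Nat.mod_lt m hp)))]
  · rw [show PySem.Int.bor (-(↑m:Int)-1) (-(↑n:Int)-1) = -↑(m &&& n) - 1 by
      unfold PySem.Int.bor
      rw [if_neg (by omega), if_neg (by omega), show (-(-(↑m:Int)-1)-1) = ↑m by ring,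
        show (-(-(↑n:Int)-1)-1) = ↑n by ring]
      simp [Int.toNat_natCast]]
    rw [pvNF_neg, pvNF_neg, pvNF_neg, Nat.and_mod_two_pow,
      ← pv_compl k (m % 2^k) (Nat.mod_lt m hp), ← pv_compl k (n % 2^k) (Nat.mod_lt n hp),
      pv_id_or_neg k (m % 2^k) (n % 2^k) (Nat.mod_lt m hp) (Nat.mod_lt n hp),
      ← pv_compl k (m % 2^k &&& n % 2^k)
        (Nat.lt_of_le_of_lt (Nat.and_le_left) (Nat.mod_lt m hp))]

theorem pvNF_shr (k s : Nat) (u : Int) : pvNF k (u >>> s) = pvNF (k+s) u >>> s := by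
  rcases u with a | m
  · show pvNF k ↑(a >>> s) = pvNF (k+s) ↑a >>> s
    rw [pvNF_cast, pvNF_cast, pv_nshr]
  · show pvNF k (Int.negSucc (m >>> s)) = pvNF (k+s) (Int.negSucc m) >>> s
    rw [show Int.negSucc (m >>> s) = -↑(m >>> s) - 1 by rw [Int.negSucc_eq]; ring,
      show Int.negSucc m = -↑m - 1 by rw [Int.negSucc_eq]; ring,
      pvNF_neg, pvNF_neg, pv_nshr, pv_compl_shr s k (m % 2^(k+s)) (Nat.mod_lt m (Nat.two_pow_pos _))]

theorem pvNF_NF (j m : Nat) (u : Int) (h : j ≤ m) : pvNF j ((pvNF m u : Nat) : Int) = pvNF j u := by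
  rw [pvNF_cast]
  unfold pvNF
  have h0 : 0 ≤ u % (2:Int)^m := Int.emod_nonneg u (ne_of_gt (pv_pow_pos m))
  have h1 : ((u % (2:Int)^m).toNat : Int) = u % 2^m := Int.toNat_of_nonneg h0
  rw [show u % (2:Int)^j = (u % (2:Int)^m) % 2^j from (Int.emod_emod_of_dvd u (pow_dvd_pow 2 h)).symm,
    ← h1, show ((2:Int)^j) = ((2^j : Nat) : Int) from by push_cast; ring, ← Int.natCast_emod,
    Int.toNat_natCast, Int.toNat_natCast]

theorem pv_band_mask (k : Nat) (u : Int) :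
    PySem.Int.band u ((2:Int)^k - 1) = ((pvNF k u : Nat) : Int) := by
  have hM : ((2:Int)^k - 1) = ((2^k - 1 : Nat) : Int) := by
    push_cast [Nat.cast_sub (Nat.one_le_two_pow)]; ring
  rcases pv_int_cases u with ⟨a, rfl⟩ | ⟨m, rfl⟩
  · rw [hM, show PySem.Int.band ↑a ↑(2^k - 1 : Nat) = ↑(a &&& (2^k - 1)) by
      unfold PySem.Int.band
      rw [if_pos (by positivity), if_pos (by positivity), Int.toNat_natCast, Int.toNat_natCast]]
    rw [pv_and_mask, pvNF_cast]
  · rw [hM, show PySem.Int.band (-(↑m:Int)-1) ↑(2^k - 1 : Nat) = ↑((2^k - 1) - ((2^k - 1) &&& m)) by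
      unfold PySem.Int.band
      rw [if_neg (by omega), if_pos (by positivity), show (-(-(↑m:Int)-1)-1) = ↑m by ring,
        Int.toNat_natCast, Int.toNat_natCast]]
    rw [Nat.and_comm, pv_and_mask, pvNF_neg]

theorem pv_shl_cast (c s : Nat) : ((c : Int) <<< s) = ((c <<< s : Nat) : Int) := rfl

-- ===== port-level invariance: both ports depend on the codeword only through its low byte =====

theorem pv_mask255 (w : Int) : PySem.Int.band w 255 = ((pvNF 8 w : Nat) : Int) := by
  have := pv_band_mask 8 w; norm_num at this; exact this

theorem pv_mask1 (w : Int) : PySem.Int.band w 1 = ((pvNF 1 w : Nat) : Int) := by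
  have := pv_band_mask 1 w; norm_num at this; exact this

theorem pv_shl_nf_zero (j ls c : Nat) (h : j ≤ ls) : pvNF j ((c <<< ls : Nat) : Int) = 0 := by
  rw [pvNF_cast, Nat.shiftLeft_eq,
    show (2:Nat)^ls = 2^(ls-j) * 2^j from by rw [← pow_add]; congr 1; omega,
    ← mul_assoc, Nat.mul_mod_left]

theorem pv_rot_nf (j : Nat) (hj : j ≤ 7) (t t' : Int)
    (h : pvNF (j+1) t = pvNF (j+1) t') : pvNF j (pvRot1 t) = pvNF j (pvRot1 t') := by
  unfold pvRot1
  rw [pv_mask255, pv_mask255, pv_mask1, pv_mask1, pv_shl_cast, pv_shl_cast,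
    pvNF_NF j 8 _ (by omega), pvNF_NF j 8 _ (by omega), pvNF_bor, pvNF_bor,
    pvNF_shr, pvNF_shr, pv_shl_nf_zero j 7 _ hj, pv_shl_nf_zero j 7 _ hj,
    Nat.or_zero, Nat.or_zero, h]

theorem pv_chain_nf (l : List Int) : ∀ (j : Nat), j + l.length ≤ 8 → ∀ t t' : Int,
    pvNF (j + l.length) t = pvNF (j + l.length) t' →
    pvNF j (l.foldl (fun temp _ => pvRot1 temp) t) =
      pvNF j (l.foldl (fun temp _ => pvRot1 temp) t') := by
  induction l with
  | nil => intro j hj t t' h; simpa using h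
  | cons x xs ih =>
    intro j hj t t' h
    simp only [List.foldl_cons]
    apply ih j (by simp at hj ⊢; omega)
    apply pv_rot_nf (j + xs.length) (by simp at hj; omega)
    have hc : j + (x :: xs).length = j + xs.length + 1 := by simp; omega
    rw [hc] at h
    exact h

theorem pvNF_mono (u u' : Int) (h : pvNF 8 u = pvNF 8 u') (m : Nat) (hm : m ≤ 8) :
    pvNF m u = pvNF m u' := by
  rw [← pvNF_NF m 8 u hm, h, pvNF_NF m 8 u' hm]

theorem pv_sbit_inv (bits : List Int) (hb : ∀ tb ∈ bits, 0 ≤ tb ∧ tb ≤ 7) (u u' : Int)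
    (h : pvNF 8 u = pvNF 8 u') : pvSBit u bits = pvSBit u' bits := by
  unfold pvSBit
  rw [pv_mask1, pv_mask1]
  suffices haux : ∀ (bs : List Int), (∀ tb ∈ bs, 0 ≤ tb ∧ tb ≤ 7) → ∀ s s' : Int,
      pvNF 1 s = pvNF 1 s' →
      pvNF 1 (bs.foldl (fun scratch tb => PySem.Int.bxor scratch
          ((PySem.List.pyRange 0 tb 1).foldl (fun temp _ => pvRot1 temp) u)) s) =
      pvNF 1 (bs.foldl (fun scratch tb => PySem.Int.bxor scratch
          ((PySem.List.pyRange 0 tb 1).foldl (fun temp _ => pvRot1 temp) u')) s') by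
    exact congrArg (fun n : Nat => (n : Int)) (haux bits hb 0 0 rfl)
  intro bs
  induction bs with
  | nil => intro _ s s' hs; simpa using hs
  | cons x xs ih =>
    intro hbs s s' hs
    simp only [List.foldl_cons]
    apply ih (fun tb htb => hbs tb (List.mem_cons_of_mem x htb))
    obtain ⟨hx0, hx7⟩ := hbs x List.mem_cons_self
    have hlen : (PySem.List.pyRange 0 x 1).length = x.toNat := by
      rw [PySem.List.length_pyRange_one]; norm_num
    rw [pvNF_bxor, pvNF_bxor, hs]
    have hch := pv_chain_nf (PySem.List.pyRange 0 x 1) 1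
      (by rw [hlen]; omega) u u'
      (by rw [hlen]; exact pvNF_mono u u' h (1 + x.toNat) (by omega))
    rw [hch]

theorem pv_fold_nf (j ls : Nat) (hls : j ≤ ls) (h2j : j + j ≤ 8) (p p' : Int)
    (h : pvNF (j+j) p = pvNF (j+j) p') :
    pvNF j (pvFoldStep j ls ((2:Int)^j - 1) p) = pvNF j (pvFoldStep j ls ((2:Int)^j - 1) p') := by
  unfold pvFoldStep
  rw [pvNF_bxor, pvNF_bxor, pv_mask255, pv_mask255, pv_band_mask, pv_band_mask,
    pv_shl_cast, pv_shl_cast, pvNF_NF j 8 _ (by omega), pvNF_NF j 8 _ (by omega),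
    pvNF_bor, pvNF_bor, pvNF_shr, pvNF_shr, pv_shl_nf_zero j ls _ hls,
    pv_shl_nf_zero j ls _ hls, Nat.or_zero, Nat.or_zero, h,
    show pvNF j p = pvNF j p' from by
      rw [← pvNF_NF j (j+j) p (by omega), h, pvNF_NF j (j+j) p' (by omega)]]

theorem pv_p3_nf (u u' : Int) (h : pvNF 8 u = pvNF 8 u') :
    pvNF 1 (pvFoldStep 1 7 1 (pvFoldStep 2 6 3 (pvFoldStep 4 4 15 u))) =
      pvNF 1 (pvFoldStep 1 7 1 (pvFoldStep 2 6 3 (pvFoldStep 4 4 15 u'))) := by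
  have e4 := pv_fold_nf 4 4 (by omega) (by omega) u u' h
  norm_num at e4
  have e2 := pv_fold_nf 2 6 (by omega) (by omega) _ _ e4
  norm_num at e2
  have e1 := pv_fold_nf 1 7 (by omega) (by omega) _ _ e2
  norm_num at e1
  exact e1

theorem pv_A_inv (u u' : Int) (h : pvNF 8 u = pvNF 8 u') :
    fb2d_syndrome_simulation u = fb2d_syndrome_simulation u' := by
  simp only [fb2d_syndrome_simulation]
  rw [pv_sbit_inv [1, 3, 5, 7] (by decide) u u' h,
    pv_sbit_inv [2, 3, 6, 7] (by decide) u u' h,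
    pv_sbit_inv [4, 5, 6, 7] (by decide) u u' h,
    pv_mask1, pv_mask1, pv_p3_nf u u' h]

theorem pv_B_inv (u u' : Int) (h : pvNF 8 u = pvNF 8 u') :
    fb2d_syndrome_simulation_alt u = fb2d_syndrome_simulation_alt u' := by
  simp only [fb2d_syndrome_simulation_alt]
  rw [pv_mask255, pv_mask255, h]

set_option maxRecDepth 10000 in
theorem pv_all_bytes : ((List.range 256).all (fun r =>
    fb2d_syndrome_simulation (r : Int) == fb2d_syndrome_simulation_alt (r : Int))) = true := by
  decide

theorem pv_main (n : Int) : fb2d_syndrome_simulation n = fb2d_syndrome_simulation_alt n := by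
  have hlt : pvNF 8 n < 256 := by have := pvNF_lt 8 n; norm_num at this; exact this
  have hself : pvNF 8 n = pvNF 8 ((pvNF 8 n : Nat) : Int) := (pvNF_NF 8 8 n le_rfl).symm
  rw [pv_A_inv n _ hself, pv_B_inv n _ hself]
  exact eq_of_beq (List.all_eq_true.mp pv_all_bytes (pvNF 8 n) (List.mem_range.mpr hlt))

-- ===== VERDICT (by name: the statement is the Claim_ definition above) =====
theorem fb2d_syndrome_simulation_spec : Claim_equal_fb2d_syndrome_simulation := by
  intro codeword _dom
  unfold Spec_fb2d_syndrome_simulation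
  exact pv_main codeword
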